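-- pv_equiv track=rewrite | github.com/cuappdev/eatery-backend-v2 | transactions/controllers/update_transactions_controller.py | eatery_name
-- ===== SOURCE A (Python) =====
-- def eatery_name(vendor_eatery_name):
--     vendor_eatery_name = ''.join(c.lower() for c in vendor_eatery_name if c.isalpha())
--     if vendor_eatery_name == "bearnecessities":
--         return "Bear Necessities Grill & C-Store"
--     elif vendor_eatery_name == "northstarmarketplace":
--         return "North Star Dining Room"
--     elif vendor_eatery_name == "jansensmarket":
--         return "Jansen's Market"
--     elif vendor_eatery_name == "stockinghallcafe" or vendor_eatery_name == "stockinghall":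
--         return "Cornell Dairy Bar"
--     elif vendor_eatery_name == "marthas":
--         return "Martha's Café"
--     elif vendor_eatery_name == "cafejennie":
--         return "Café Jennie"
--     elif vendor_eatery_name == "goldiescafe":
--         return "Goldie's Café"
--     elif vendor_eatery_name == "alicecookhouse":
--         return "Cook House Dining Room"
--     elif vendor_eatery_name == "carlbeckerhouse":
--         return "Becker House Dining Room"
--     elif vendor_eatery_name == "duffield":
--         return "Mattin's Café"
--     elif vendor_eatery_name == "greendragon":
--         return "Green Dragon"
--     elif vendor_eatery_name == "trillium":
--         return "Trillium"
--     elif vendor_eatery_name == "olinlibecafe":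
--         return "Amit Bhatia Libe Café"
--     elif vendor_eatery_name == "carolscafe":
--         return "Carol's Café"
--     elif vendor_eatery_name == "statlerterrace":
--         return "Terrace Restaurant"
--     elif vendor_eatery_name == "busstopbagels":
--         return "Bus Stop Bagels"
--     elif vendor_eatery_name == "kosher":
--         return "104West!"
--     elif vendor_eatery_name == "jansensatbethehouse":
--         return "Jansen's Dining Room at Bethe House"
--     elif vendor_eatery_name == "keetonhouse":
--         return "Keeton House Dining Room"
--     elif vendor_eatery_name == "rpme":
--         return "Robert Purcell Marketplace Eatery"
--     elif vendor_eatery_name == "rosehouse":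
--         return "Rose House Dining Room"
--     elif vendor_eatery_name == "risley":
--         return "Risley Dining Room"
--     elif vendor_eatery_name == "frannysft":
--         return "Franny's"
--     elif vendor_eatery_name == "mccormicks":
--         return "McCormick's at Moakley House"
--     elif vendor_eatery_name == "sage":
--         return "Atrium Café"
--     elif vendor_eatery_name == "straightmarket":
--         return "Straight from the Market"
--     elif vendor_eatery_name == "crossingscafe":
--         return "Crossings Café"
--     elif vendor_eatery_name == "okenshields":
--         return "Okenshields"
--     elif vendor_eatery_name == "bigredbarn":
--         return "Big Red Barn"
--     elif vendor_eatery_name == "rustys":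
--         return "Rusty's"
--     elif vendor_eatery_name == "manncafe":
--         return "Mann Café"
--     elif vendor_eatery_name == "statlermacs":
--         return "Mac's Café"
--     else:
--         # TODO: Add a slack notif / flag that a wait time location was not recognized
--         return ""
-- ===== SOURCE B (Python) =====
-- # Sorted table + recursive binary search by slicing, instead of a 33-branch if/elif chain.
-- _SORTED_TABLE = [
--     ("alicecookhouse", "Cook House Dining Room"),
--     ("bearnecessities", "Bear Necessities Grill & C-Store"),
--     ("bigredbarn", "Big Red Barn"),
--     ("busstopbagels", "Bus Stop Bagels"),
--     ("cafejennie", "Café Jennie"),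
--     ("carlbeckerhouse", "Becker House Dining Room"),
--     ("carolscafe", "Carol's Café"),
--     ("crossingscafe", "Crossings Café"),
--     ("duffield", "Mattin's Café"),
--     ("frannysft", "Franny's"),
--     ("goldiescafe", "Goldie's Café"),
--     ("greendragon", "Green Dragon"),
--     ("jansensatbethehouse", "Jansen's Dining Room at Bethe House"),
--     ("jansensmarket", "Jansen's Market"),
--     ("keetonhouse", "Keeton House Dining Room"),
--     ("kosher", "104West!"),
--     ("manncafe", "Mann Café"),
--     ("marthas", "Martha's Café"),
--     ("mccormicks", "McCormick's at Moakley House"),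
--     ("northstarmarketplace", "North Star Dining Room"),
--     ("okenshields", "Okenshields"),
--     ("olinlibecafe", "Amit Bhatia Libe Café"),
--     ("risley", "Risley Dining Room"),
--     ("rosehouse", "Rose House Dining Room"),
--     ("rpme", "Robert Purcell Marketplace Eatery"),
--     ("rustys", "Rusty's"),
--     ("sage", "Atrium Café"),
--     ("statlermacs", "Mac's Café"),
--     ("statlerterrace", "Terrace Restaurant"),
--     ("stockinghall", "Cornell Dairy Bar"),
--     ("stockinghallcafe", "Cornell Dairy Bar"),
--     ("straightmarket", "Straight from the Market"),
--     ("trillium", "Trillium"),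
-- ]
--
--
-- def _bsearch(table, key):
--     if not table:
--         return ""
--     m = len(table) // 2
--     k, name = table[m]
--     if key < k:
--         return _bsearch(table[:m], key)
--     if k < key:
--         return _bsearch(table[m + 1:], key)
--     return name
--
--
-- def eatery_name(vendor_eatery_name):
--     key = ''.join(c.lower() for c in vendor_eatery_name if c.isalpha())
--     return _bsearch(_SORTED_TABLE, key)
-- ===== Notes on version B (the rewrite author's own statement) =====
-- stated objective: alternative
-- what changed: Replaced the 33-branch sequential if/elif chain with a lexicographically sorted key table searched by a recursive divide-and-conquer binary search (slicing the table in half each step), with the same normalization and empty-string default.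
import Mathlib
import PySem

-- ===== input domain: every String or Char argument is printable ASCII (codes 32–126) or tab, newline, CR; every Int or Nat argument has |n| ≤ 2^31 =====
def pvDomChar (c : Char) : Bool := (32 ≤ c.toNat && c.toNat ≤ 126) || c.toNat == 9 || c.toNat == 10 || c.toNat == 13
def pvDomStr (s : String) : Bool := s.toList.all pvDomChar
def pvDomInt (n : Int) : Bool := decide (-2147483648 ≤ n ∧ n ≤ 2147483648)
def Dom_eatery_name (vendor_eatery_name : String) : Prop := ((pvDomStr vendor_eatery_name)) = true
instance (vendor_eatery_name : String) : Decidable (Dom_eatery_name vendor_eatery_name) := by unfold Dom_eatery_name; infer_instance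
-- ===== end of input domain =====

-- ===== PORT A =====
-- B replaces A's 33-branch if/elif chain by a sorted key table searched with a
-- recursive, slicing binary search (alternative algorithm; same values).
def eatery_name (vendor_eatery_name : String) : String :=
  let v : String := String.ofList (((vendor_eatery_name.toList.filter (fun c => PySem.Chars.isalpha c)).map (fun c => PySem.Chars.lowerChar c)))
  if v = "bearnecessities" then "Bear Necessities Grill & C-Store"
  else if v = "northstarmarketplace" then "North Star Dining Room"
  else if v = "jansensmarket" then "Jansen's Market"
  else if v = "stockinghallcafe" ∨ v = "stockinghall" then "Cornell Dairy Bar"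
  else if v = "marthas" then "Martha's Café"
  else if v = "cafejennie" then "Café Jennie"
  else if v = "goldiescafe" then "Goldie's Café"
  else if v = "alicecookhouse" then "Cook House Dining Room"
  else if v = "carlbeckerhouse" then "Becker House Dining Room"
  else if v = "duffield" then "Mattin's Café"
  else if v = "greendragon" then "Green Dragon"
  else if v = "trillium" then "Trillium"
  else if v = "olinlibecafe" then "Amit Bhatia Libe Café"
  else if v = "carolscafe" then "Carol's Café"
  else if v = "statlerterrace" then "Terrace Restaurant"
  else if v = "busstopbagels" then "Bus Stop Bagels"
  else if v = "kosher" then "104West!"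
  else if v = "jansensatbethehouse" then "Jansen's Dining Room at Bethe House"
  else if v = "keetonhouse" then "Keeton House Dining Room"
  else if v = "rpme" then "Robert Purcell Marketplace Eatery"
  else if v = "rosehouse" then "Rose House Dining Room"
  else if v = "risley" then "Risley Dining Room"
  else if v = "frannysft" then "Franny's"
  else if v = "mccormicks" then "McCormick's at Moakley House"
  else if v = "sage" then "Atrium Café"
  else if v = "straightmarket" then "Straight from the Market"
  else if v = "crossingscafe" then "Crossings Café"
  else if v = "okenshields" then "Okenshields"
  else if v = "bigredbarn" then "Big Red Barn"
  else if v = "rustys" then "Rusty's"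
  else if v = "manncafe" then "Mann Café"
  else if v = "statlermacs" then "Mac's Café"
  else ""

-- ===== PORT B =====
-- the table, sorted lexicographically by key (Source B's _SORTED_TABLE)
def pvSortedTable : List (String × String) := [
    ("alicecookhouse", "Cook House Dining Room"),
    ("bearnecessities", "Bear Necessities Grill & C-Store"),
    ("bigredbarn", "Big Red Barn"),
    ("busstopbagels", "Bus Stop Bagels"),
    ("cafejennie", "Café Jennie"),
    ("carlbeckerhouse", "Becker House Dining Room"),
    ("carolscafe", "Carol's Café"),
    ("crossingscafe", "Crossings Café"),
    ("duffield", "Mattin's Café"),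
    ("frannysft", "Franny's"),
    ("goldiescafe", "Goldie's Café"),
    ("greendragon", "Green Dragon"),
    ("jansensatbethehouse", "Jansen's Dining Room at Bethe House"),
    ("jansensmarket", "Jansen's Market"),
    ("keetonhouse", "Keeton House Dining Room"),
    ("kosher", "104West!"),
    ("manncafe", "Mann Café"),
    ("marthas", "Martha's Café"),
    ("mccormicks", "McCormick's at Moakley House"),
    ("northstarmarketplace", "North Star Dining Room"),
    ("okenshields", "Okenshields"),
    ("olinlibecafe", "Amit Bhatia Libe Café"),
    ("risley", "Risley Dining Room"),
    ("rosehouse", "Rose House Dining Room"),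
    ("rpme", "Robert Purcell Marketplace Eatery"),
    ("rustys", "Rusty's"),
    ("sage", "Atrium Café"),
    ("statlermacs", "Mac's Café"),
    ("statlerterrace", "Terrace Restaurant"),
    ("stockinghall", "Cornell Dairy Bar"),
    ("stockinghallcafe", "Cornell Dairy Bar"),
    ("straightmarket", "Straight from the Market"),
    ("trillium", "Trillium")]

-- Source B's _bsearch: recursive binary search by slicing the table in half
def pvBsearch : List (String × String) → String → String
  | [], _ => ""
  | x :: xs, key =>
    let table := x :: xs
    let m := table.length / 2
    let p := table.getD m ("", "")
    if key < p.1 then pvBsearch (table.take m) key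
    else if p.1 < key then pvBsearch (table.drop (m + 1)) key
    else p.2
termination_by l _ => l.length
decreasing_by
  · simp only [List.length_take, List.length_cons]; omega
  · simp only [List.length_drop, List.length_cons]; omega

def eatery_name_alt (vendor_eatery_name : String) : String :=
  let key : String := String.ofList (((vendor_eatery_name.toList.filter (fun c => PySem.Chars.isalpha c)).map (fun c => PySem.Chars.lowerChar c)))
  pvBsearch pvSortedTable key

-- ===== PRECONDITION & SPEC =====
def Spec_eatery_name (vendor_eatery_name : String) (out : String) : Prop := out = eatery_name_alt vendor_eatery_name
instance (vendor_eatery_name : String) (out : String) : Decidable (Spec_eatery_name vendor_eatery_name out) := by unfold Spec_eatery_name; infer_instance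

-- ===== CLAIM (what is proved, stated in full; the proofs are below) =====
def Claim_equal_eatery_name : Prop := ∀ (vendor_eatery_name : String), Dom_eatery_name vendor_eatery_name → Spec_eatery_name vendor_eatery_name (eatery_name vendor_eatery_name)

-- ===== LEMMAS AND PROOFS =====

-- sequential first-match association lookup with "" default (the reference form)
def pvAssoc (l : List (String × String)) (v : String) : String :=
  match l.find? (fun p => p.1 == v) with
  | some p => p.2
  | none => ""

lemma pvAssoc_append_right (l₁ l₂ : List (String × String)) (v : String)
    (h : ∀ p ∈ l₁, p.1 ≠ v) : pvAssoc (l₁ ++ l₂) v = pvAssoc l₂ v := by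
  have h1 : l₁.find? (fun p => p.1 == v) = none :=
    List.find?_eq_none.mpr (fun p hp => by simpa using h p hp)
  simp [pvAssoc, List.find?_append, h1]

lemma pvAssoc_append_left (l₁ l₂ : List (String × String)) (v : String)
    (h : ∀ p ∈ l₂, p.1 ≠ v) : pvAssoc (l₁ ++ l₂) v = pvAssoc l₁ v := by
  have h2 : l₂.find? (fun p => p.1 == v) = none :=
    List.find?_eq_none.mpr (fun p hp => by simpa using h p hp)
  cases hf : l₁.find? (fun p => p.1 == v) with
  | none => simp [pvAssoc, List.find?_append, hf, h2]
  | some p => simp [pvAssoc, List.find?_append, hf]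

lemma pvAssoc_split (L R : List (String × String)) (p : String × String) (v : String)
    (hL : ∀ q ∈ L, q.1 < p.1) (hR : ∀ q ∈ R, p.1 < q.1) :
    pvAssoc (L ++ p :: R) v =
      if v < p.1 then pvAssoc L v
      else if p.1 < v then pvAssoc R v
      else p.2 := by
  by_cases h1 : v < p.1
  · rw [if_pos h1]
    refine pvAssoc_append_left _ _ _ ?_
    intro q hq
    rcases List.mem_cons.mp hq with rfl | hq'
    · exact fun h => absurd (h ▸ h1) (lt_irrefl _)
    · exact fun h => absurd (h ▸ lt_trans h1 (hR q hq')) (lt_irrefl _)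
  · rw [if_neg h1]
    by_cases h2 : p.1 < v
    · rw [if_pos h2]
      have : L ++ p :: R = (L ++ [p]) ++ R := by simp
      rw [this]
      refine pvAssoc_append_right _ _ _ ?_
      intro q hq
      rcases List.mem_append.mp hq with hq' | hq'
      · exact ne_of_lt (lt_trans (hL q hq') h2)
      · rcases List.mem_singleton.mp hq' with rfl
        exact ne_of_lt h2
    · rw [if_neg h2]
      have hv : p.1 = v := le_antisymm (not_lt.mp h1) (not_lt.mp h2)
      rw [pvAssoc_append_right _ _ _ (fun q hq => ne_of_lt (hv ▸ hL q hq))]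
      simp [pvAssoc, hv]

lemma pvBsearch_eq_assoc_aux (n : Nat) : ∀ (l : List (String × String)), l.length ≤ n →
    l.Pairwise (fun a b => a.1 < b.1) → ∀ v, pvBsearch l v = pvAssoc l v := by
  induction n with
  | zero =>
    intro l hl _ v
    have : l = [] := List.eq_nil_of_length_eq_zero (Nat.le_zero.mp hl)
    subst this; simp [pvBsearch, pvAssoc]
  | succ n ih =>
    intro l hlen hsort v
    match l, hlen, hsort with
    | [], _, _ => simp [pvBsearch, pvAssoc]
    | x :: xs, hlen, hsort =>
      have hm : (x :: xs).length / 2 < (x :: xs).length :=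
        Nat.div_lt_self (by simp) (by norm_num)
      have hunfold : pvBsearch (x :: xs) v =
          (if v < ((x :: xs).getD ((x :: xs).length / 2) ("", "")).1 then
             pvBsearch ((x :: xs).take ((x :: xs).length / 2)) v
           else if ((x :: xs).getD ((x :: xs).length / 2) ("", "")).1 < v then
             pvBsearch ((x :: xs).drop ((x :: xs).length / 2 + 1)) v
           else ((x :: xs).getD ((x :: xs).length / 2) ("", "")).2) := by
        rw [pvBsearch]
      have hsplit : x :: xs =
          (x :: xs).take ((x :: xs).length / 2) ++
            ((x :: xs).getD ((x :: xs).length / 2) ("", "")) ::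
              (x :: xs).drop ((x :: xs).length / 2 + 1) := by
        conv_lhs => rw [← List.take_append_drop ((x :: xs).length / 2) (x :: xs)]
        rw [List.drop_eq_getElem_cons hm, List.getD_eq_getElem _ _ hm]
      have hsort' : ((x :: xs).take ((x :: xs).length / 2) ++
            ((x :: xs).getD ((x :: xs).length / 2) ("", "")) ::
              (x :: xs).drop ((x :: xs).length / 2 + 1)).Pairwise (fun a b => a.1 < b.1) := by
        rw [← hsplit]; exact hsort
      rw [List.pairwise_append] at hsort'
      obtain ⟨hsl, hsr, hcross⟩ := hsort'
      have hL : ∀ q ∈ (x :: xs).take ((x :: xs).length / 2),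
          q.1 < ((x :: xs).getD ((x :: xs).length / 2) ("", "")).1 :=
        fun q hq => hcross q hq _ (List.mem_cons_self ..)
      have hR : ∀ q ∈ (x :: xs).drop ((x :: xs).length / 2 + 1),
          ((x :: xs).getD ((x :: xs).length / 2) ("", "")).1 < q.1 :=
        fun q hq => (List.pairwise_cons.mp hsr).1 q hq
      have hRHS : pvAssoc (x :: xs) v =
          (if v < ((x :: xs).getD ((x :: xs).length / 2) ("", "")).1 then
             pvAssoc ((x :: xs).take ((x :: xs).length / 2)) v
           else if ((x :: xs).getD ((x :: xs).length / 2) ("", "")).1 < v then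
             pvAssoc ((x :: xs).drop ((x :: xs).length / 2 + 1)) v
           else ((x :: xs).getD ((x :: xs).length / 2) ("", "")).2) := by
        conv_lhs => rw [hsplit]
        exact pvAssoc_split _ _ _ _ hL hR
      rw [hunfold, hRHS]
      by_cases h1 : v < ((x :: xs).getD ((x :: xs).length / 2) ("", "")).1
      · rw [if_pos h1, if_pos h1]
        exact ih _ (by simp [List.length_take]; simp at hlen; omega)
          (List.Pairwise.sublist (List.take_sublist _ _) hsort) v
      · rw [if_neg h1, if_neg h1]
        by_cases h2 : ((x :: xs).getD ((x :: xs).length / 2) ("", "")).1 < v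
        · rw [if_pos h2, if_pos h2]
          exact ih _ (by simp [List.length_drop]; simp at hlen; omega)
            (List.Pairwise.sublist (List.drop_sublist _ _) hsort) v
        · rw [if_neg h2, if_neg h2]

lemma pvBsearch_eq_assoc (l : List (String × String))
    (hl : l.Pairwise (fun a b => a.1 < b.1)) (v : String) :
    pvBsearch l v = pvAssoc l v :=
  pvBsearch_eq_assoc_aux l.length l le_rfl hl v

set_option maxHeartbeats 2000000 in
lemma pvSortedTable_sorted : pvSortedTable.Pairwise (fun a b => a.1 < b.1) := by
  have h : pvSortedTable.IsChain (fun a b => a.1 < b.1) := by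
    simp only [pvSortedTable, List.isChain_cons_cons, List.IsChain.singleton, and_true,
      String.lt_iff_toList_lt]
    decide
  haveI : Trans (fun (a b : String × String) => a.1 < b.1)
      (fun (a b : String × String) => a.1 < b.1)
      (fun (a b : String × String) => a.1 < b.1) := ⟨fun hab hbc => lt_trans hab hbc⟩
  exact h.pairwise

-- A's if/elif chain agrees with sequential lookup in the sorted table, for every key string
set_option maxHeartbeats 2000000 in
set_option maxRecDepth 16384 in
lemma chain_eq_assoc (v : String) :
    (if v = "bearnecessities" then "Bear Necessities Grill & C-Store"
     else if v = "northstarmarketplace" then "North Star Dining Room"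
     else if v = "jansensmarket" then "Jansen's Market"
     else if v = "stockinghallcafe" ∨ v = "stockinghall" then "Cornell Dairy Bar"
     else if v = "marthas" then "Martha's Café"
     else if v = "cafejennie" then "Café Jennie"
     else if v = "goldiescafe" then "Goldie's Café"
     else if v = "alicecookhouse" then "Cook House Dining Room"
     else if v = "carlbeckerhouse" then "Becker House Dining Room"
     else if v = "duffield" then "Mattin's Café"
     else if v = "greendragon" then "Green Dragon"
     else if v = "trillium" then "Trillium"
     else if v = "olinlibecafe" then "Amit Bhatia Libe Café"
     else if v = "carolscafe" then "Carol's Café"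
     else if v = "statlerterrace" then "Terrace Restaurant"
     else if v = "busstopbagels" then "Bus Stop Bagels"
     else if v = "kosher" then "104West!"
     else if v = "jansensatbethehouse" then "Jansen's Dining Room at Bethe House"
     else if v = "keetonhouse" then "Keeton House Dining Room"
     else if v = "rpme" then "Robert Purcell Marketplace Eatery"
     else if v = "rosehouse" then "Rose House Dining Room"
     else if v = "risley" then "Risley Dining Room"
     else if v = "frannysft" then "Franny's"
     else if v = "mccormicks" then "McCormick's at Moakley House"
     else if v = "sage" then "Atrium Café"
     else if v = "straightmarket" then "Straight from the Market"
     else if v = "crossingscafe" then "Crossings Café"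
     else if v = "okenshields" then "Okenshields"
     else if v = "bigredbarn" then "Big Red Barn"
     else if v = "rustys" then "Rusty's"
     else if v = "manncafe" then "Mann Café"
     else if v = "statlermacs" then "Mac's Café"
     else "" : String)
 =
    pvAssoc pvSortedTable v := by
  by_cases h1 : v = "bearnecessities"
  · subst h1; decide
  rw [if_neg h1]
  by_cases h2 : v = "northstarmarketplace"
  · subst h2; decide
  rw [if_neg h2]
  by_cases h3 : v = "jansensmarket"
  · subst h3; decide
  rw [if_neg h3]
  by_cases h4 : v = "stockinghallcafe" ∨ v = "stockinghall"
  · rcases h4 with h | h <;> (subst h; decide)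
  rw [if_neg h4]
  by_cases h5 : v = "marthas"
  · subst h5; decide
  rw [if_neg h5]
  by_cases h6 : v = "cafejennie"
  · subst h6; decide
  rw [if_neg h6]
  by_cases h7 : v = "goldiescafe"
  · subst h7; decide
  rw [if_neg h7]
  by_cases h8 : v = "alicecookhouse"
  · subst h8; decide
  rw [if_neg h8]
  by_cases h9 : v = "carlbeckerhouse"
  · subst h9; decide
  rw [if_neg h9]
  by_cases h10 : v = "duffield"
  · subst h10; decide
  rw [if_neg h10]
  by_cases h11 : v = "greendragon"
  · subst h11; decide
  rw [if_neg h11]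
  by_cases h12 : v = "trillium"
  · subst h12; decide
  rw [if_neg h12]
  by_cases h13 : v = "olinlibecafe"
  · subst h13; decide
  rw [if_neg h13]
  by_cases h14 : v = "carolscafe"
  · subst h14; decide
  rw [if_neg h14]
  by_cases h15 : v = "statlerterrace"
  · subst h15; decide
  rw [if_neg h15]
  by_cases h16 : v = "busstopbagels"
  · subst h16; decide
  rw [if_neg h16]
  by_cases h17 : v = "kosher"
  · subst h17; decide
  rw [if_neg h17]
  by_cases h18 : v = "jansensatbethehouse"
  · subst h18; decide
  rw [if_neg h18]
  by_cases h19 : v = "keetonhouse"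
  · subst h19; decide
  rw [if_neg h19]
  by_cases h20 : v = "rpme"
  · subst h20; decide
  rw [if_neg h20]
  by_cases h21 : v = "rosehouse"
  · subst h21; decide
  rw [if_neg h21]
  by_cases h22 : v = "risley"
  · subst h22; decide
  rw [if_neg h22]
  by_cases h23 : v = "frannysft"
  · subst h23; decide
  rw [if_neg h23]
  by_cases h24 : v = "mccormicks"
  · subst h24; decide
  rw [if_neg h24]
  by_cases h25 : v = "sage"
  · subst h25; decide
  rw [if_neg h25]
  by_cases h26 : v = "straightmarket"
  · subst h26; decide
  rw [if_neg h26]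
  by_cases h27 : v = "crossingscafe"
  · subst h27; decide
  rw [if_neg h27]
  by_cases h28 : v = "okenshields"
  · subst h28; decide
  rw [if_neg h28]
  by_cases h29 : v = "bigredbarn"
  · subst h29; decide
  rw [if_neg h29]
  by_cases h30 : v = "rustys"
  · subst h30; decide
  rw [if_neg h30]
  by_cases h31 : v = "manncafe"
  · subst h31; decide
  rw [if_neg h31]
  by_cases h32 : v = "statlermacs"
  · subst h32; decide
  rw [if_neg h32]
  have hnone : pvSortedTable.find? (fun p => p.1 == v) = none := by
    simp only [pvSortedTable]
    simp [List.find?,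
      (beq_eq_false_iff_ne.mpr (fun hh => h8 hh.symm) : (("alicecookhouse" : String) == v) = false),
      (beq_eq_false_iff_ne.mpr (fun hh => h1 hh.symm) : (("bearnecessities" : String) == v) = false),
      (beq_eq_false_iff_ne.mpr (fun hh => h29 hh.symm) : (("bigredbarn" : String) == v) = false),
      (beq_eq_false_iff_ne.mpr (fun hh => h16 hh.symm) : (("busstopbagels" : String) == v) = false),
      (beq_eq_false_iff_ne.mpr (fun hh => h6 hh.symm) : (("cafejennie" : String) == v) = false),
      (beq_eq_false_iff_ne.mpr (fun hh => h9 hh.symm) : (("carlbeckerhouse" : String) == v) = false),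
      (beq_eq_false_iff_ne.mpr (fun hh => h14 hh.symm) : (("carolscafe" : String) == v) = false),
      (beq_eq_false_iff_ne.mpr (fun hh => h27 hh.symm) : (("crossingscafe" : String) == v) = false),
      (beq_eq_false_iff_ne.mpr (fun hh => h10 hh.symm) : (("duffield" : String) == v) = false),
      (beq_eq_false_iff_ne.mpr (fun hh => h23 hh.symm) : (("frannysft" : String) == v) = false),
      (beq_eq_false_iff_ne.mpr (fun hh => h7 hh.symm) : (("goldiescafe" : String) == v) = false),
      (beq_eq_false_iff_ne.mpr (fun hh => h11 hh.symm) : (("greendragon" : String) == v) = false),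
      (beq_eq_false_iff_ne.mpr (fun hh => h18 hh.symm) : (("jansensatbethehouse" : String) == v) = false),
      (beq_eq_false_iff_ne.mpr (fun hh => h3 hh.symm) : (("jansensmarket" : String) == v) = false),
      (beq_eq_false_iff_ne.mpr (fun hh => h19 hh.symm) : (("keetonhouse" : String) == v) = false),
      (beq_eq_false_iff_ne.mpr (fun hh => h17 hh.symm) : (("kosher" : String) == v) = false),
      (beq_eq_false_iff_ne.mpr (fun hh => h31 hh.symm) : (("manncafe" : String) == v) = false),
      (beq_eq_false_iff_ne.mpr (fun hh => h5 hh.symm) : (("marthas" : String) == v) = false),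
      (beq_eq_false_iff_ne.mpr (fun hh => h24 hh.symm) : (("mccormicks" : String) == v) = false),
      (beq_eq_false_iff_ne.mpr (fun hh => h2 hh.symm) : (("northstarmarketplace" : String) == v) = false),
      (beq_eq_false_iff_ne.mpr (fun hh => h28 hh.symm) : (("okenshields" : String) == v) = false),
      (beq_eq_false_iff_ne.mpr (fun hh => h13 hh.symm) : (("olinlibecafe" : String) == v) = false),
      (beq_eq_false_iff_ne.mpr (fun hh => h22 hh.symm) : (("risley" : String) == v) = false),
      (beq_eq_false_iff_ne.mpr (fun hh => h21 hh.symm) : (("rosehouse" : String) == v) = false),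
      (beq_eq_false_iff_ne.mpr (fun hh => h20 hh.symm) : (("rpme" : String) == v) = false),
      (beq_eq_false_iff_ne.mpr (fun hh => h30 hh.symm) : (("rustys" : String) == v) = false),
      (beq_eq_false_iff_ne.mpr (fun hh => h25 hh.symm) : (("sage" : String) == v) = false),
      (beq_eq_false_iff_ne.mpr (fun hh => h32 hh.symm) : (("statlermacs" : String) == v) = false),
      (beq_eq_false_iff_ne.mpr (fun hh => h15 hh.symm) : (("statlerterrace" : String) == v) = false),
      (beq_eq_false_iff_ne.mpr (fun hh => h4 (Or.inr hh.symm)) : (("stockinghall" : String) == v) = false),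
      (beq_eq_false_iff_ne.mpr (fun hh => h4 (Or.inl hh.symm)) : (("stockinghallcafe" : String) == v) = false),
      (beq_eq_false_iff_ne.mpr (fun hh => h26 hh.symm) : (("straightmarket" : String) == v) = false),
      (beq_eq_false_iff_ne.mpr (fun hh => h12 hh.symm) : (("trillium" : String) == v) = false)]
  simp [pvAssoc, hnone]

-- ===== VERDICT (by name: the statement is the Claim_ definition above) =====
theorem eatery_name_spec : Claim_equal_eatery_name := by
  intro s _
  unfold Spec_eatery_name eatery_name eatery_name_alt
  rw [pvBsearch_eq_assoc pvSortedTable pvSortedTable_sorted]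
  exact chain_eq_assoc _
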